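-- pv_equiv track=rewrite | github.com/TrueBurn/advent-of-code | 2024/day-25/solution.py | parse_schematic
-- ===== SOURCE A (Python) =====
-- def parse_schematic(schematic: str) -> int:
--     n = 0
--     for char in schematic:
--         if char == '\n':
--             continue
--         n <<= 1
--         if char == '#':
--             n |= 1
--     return n
-- ===== SOURCE B (Python) =====
-- def parse_schematic(schematic: str) -> int:
--     n = 0
--     place = 1
--     for char in reversed(schematic):
--         if char != '\n':
--             if char == '#':
--                 n += place
--             place *= 2
--     return n
-- ===== Notes on version B (the rewrite author's own statement) =====
-- stated objective: alternative
-- what changed: B traverses the schematic back-to-front accumulating a place value (n += place for '#', place *= 2 per non-newline char) instead of A's forward left-shift-and-or accumulation.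
import Mathlib
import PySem

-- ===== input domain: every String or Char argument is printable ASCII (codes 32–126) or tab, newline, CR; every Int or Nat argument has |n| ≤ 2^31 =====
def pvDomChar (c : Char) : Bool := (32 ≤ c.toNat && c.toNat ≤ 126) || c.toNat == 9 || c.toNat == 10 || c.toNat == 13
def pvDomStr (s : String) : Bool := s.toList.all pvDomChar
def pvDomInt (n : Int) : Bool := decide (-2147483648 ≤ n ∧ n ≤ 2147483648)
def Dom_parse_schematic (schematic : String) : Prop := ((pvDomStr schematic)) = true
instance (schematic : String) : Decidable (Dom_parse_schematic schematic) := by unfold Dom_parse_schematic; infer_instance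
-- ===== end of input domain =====

-- B traverses the schematic back-to-front with a place-value accumulator instead of A's forward shift-and-or; same O(n) cost, return values proved equal.


-- ===== PORT A =====
-- for char in schematic: skip '\n'; n <<= 1; if '#': n |= 1
def parse_schematic (schematic : String) : Int :=
  schematic.toList.foldl
    (fun n char =>
      if char = '\n' then n
      else
        let n := 2 * n
        if char = '#' then n + 1 else n)
    0

-- ===== PORT B =====
-- for char in reversed(schematic): if char != '\n': if '#': n += place; place *= 2
def parse_schematic_alt (schematic : String) : Int :=
  (schematic.toList.reverse.foldl
    (fun (st : Int × Int) char =>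
      if char ≠ '\n' then
        let n := if char = '#' then st.1 + st.2 else st.1
        (n, 2 * st.2)
      else st)
    (0, 1)).1

-- ===== PRECONDITION & SPEC =====
def Spec_parse_schematic (schematic : String) (out : Int) : Prop := out = parse_schematic_alt schematic
instance (schematic : String) (out : Int) : Decidable (Spec_parse_schematic schematic out) := by unfold Spec_parse_schematic; infer_instance

-- ===== CLAIM (what is proved, stated in full; the proofs are below) =====
def Claim_equal_parse_schematic : Prop := ∀ (schematic : String), Dom_parse_schematic schematic → Spec_parse_schematic schematic (parse_schematic schematic)

-- ===== LEMMAS AND PROOFS =====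

def pvStepB : Int × Int → Char → Int × Int :=
  fun st char =>
    if char ≠ '\n' then
      let n := if char = '#' then st.1 + st.2 else st.1
      (n, 2 * st.2)
    else st

-- the key invariant: A's forward fold from seed n equals n * (B's place) + (B's value)
theorem pv_fold_eq (cs : List Char) (n : Int) :
    cs.foldl
      (fun n char =>
        if char = '\n' then n
        else
          let n := 2 * n
          if char = '#' then n + 1 else n)
      n
    = n * (cs.foldr (fun c st => pvStepB st c) ((0 : Int), (1 : Int))).2
      + (cs.foldr (fun c st => pvStepB st c) ((0 : Int), (1 : Int))).1 := by
  induction cs generalizing n with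
  | nil => simp
  | cons c cs ih =>
    simp only [List.foldl_cons, List.foldr_cons]
    rw [ih]
    by_cases hnl : c = '\n' <;> by_cases hh : c = '#' <;>
      simp [pvStepB, hnl, hh] <;> ring

-- ===== VERDICT (by name: the statement is the Claim_ definition above) =====
theorem parse_schematic_spec : Claim_equal_parse_schematic := by
  intro s _
  unfold Spec_parse_schematic parse_schematic parse_schematic_alt
  rw [List.foldl_reverse]
  have h := pv_fold_eq s.toList 0
  simp only [pvStepB] at h ⊢
  omega
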